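-- pv_equiv track=rewrite | github.com/Hulyamr13/hackerrank | Summing Pieces.py | summingPieces
-- ===== SOURCE A (Python) =====
-- def summingPieces(arr):
--     #
--     # Write your code here.
--     #
--
--     partialSum = 0  # this is the sum including last element
--     count, total, coeff = 1, 0, 0
--     for i in range(len(arr)):
--         val = arr[i] % (10 ** 9 + 7)
--         coeff += count
--         coeff %= 10 ** 9 + 7
--         total *= 2
--         total %= 10 ** 9 + 7
--         total += coeff * val + partialSum
--         total %= 10 ** 9 + 7
--         partialSum += count * val
--         partialSum %= 10 ** 9 + 7
--         count *= 2
--         count %= 10 ** 9 + 7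
--
--     return total
-- ===== SOURCE B (Python) =====
-- def summingPieces(arr):
--     MOD = 10 ** 9 + 7
--     n = len(arr)
--     pow2 = []
--     p = 1
--     for _ in range(n):
--         pow2.append(p)
--         p = p * 2 % MOD
--     half = pow2[n - 1] if n != 0 else 0
--     total = 0
--     for i, a in enumerate(arr):
--         total += (a % MOD) * ((3 * half - pow2[i] - pow2[n - 1 - i]) % MOD)
--     return total % MOD
-- ===== Notes on version B (the rewrite author's own statement) =====
-- stated objective: alternative
-- what changed: Replaces A's coupled four-accumulator DP (partialSum/count/total/coeff updated each step) with a direct closed form: one pass summing arr[i]*((3*2^(n-1) - 2^i - 2^(n-1-i)) % MOD) over precomputed powers of two, reduced mod 1e9+7.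
import Mathlib
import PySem

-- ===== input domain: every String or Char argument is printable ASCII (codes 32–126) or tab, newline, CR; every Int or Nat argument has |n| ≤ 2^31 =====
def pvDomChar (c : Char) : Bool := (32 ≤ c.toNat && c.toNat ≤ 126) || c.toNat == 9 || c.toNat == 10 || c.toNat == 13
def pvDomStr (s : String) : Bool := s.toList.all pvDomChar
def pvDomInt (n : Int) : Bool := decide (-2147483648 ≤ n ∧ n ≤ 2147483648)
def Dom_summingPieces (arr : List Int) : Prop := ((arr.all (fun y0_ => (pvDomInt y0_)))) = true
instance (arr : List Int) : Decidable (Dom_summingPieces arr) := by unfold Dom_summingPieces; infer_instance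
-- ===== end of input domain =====

-- B replaces A's coupled four-accumulator DP recurrence by the closed-form per-index
-- weight arr[i]·(3·2^(n-1) − 2^i − 2^(n-1-i)) summed mod 10^9+7 (alternative, same O(n) cost).

-- ===== PORT A =====
-- state = (partialSum, count, total, coeff), exactly A's loop body
def stepA (s : Int × Int × Int × Int) (v : Int) : Int × Int × Int × Int :=
  let val := PySem.Int.mod v (10 ^ 9 + 7)
  let coeff := PySem.Int.mod (s.2.2.2 + s.2.1) (10 ^ 9 + 7)
  let total := PySem.Int.mod (s.2.2.1 * 2) (10 ^ 9 + 7)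
  let total := PySem.Int.mod (total + (coeff * val + s.1)) (10 ^ 9 + 7)
  let partialSum := PySem.Int.mod (s.1 + s.2.1 * val) (10 ^ 9 + 7)
  let count := PySem.Int.mod (s.2.1 * 2) (10 ^ 9 + 7)
  (partialSum, count, total, coeff)

def summingPieces (arr : List Int) : Int :=
  ((PySem.List.pyRange 0 (arr.length : Int) 1).foldl
    (fun s i => stepA s (PySem.List.pyGetD arr i 0)) (0, 1, 0, 0)).2.2.1

-- ===== PORT B =====
def summingPieces_alt (arr : List Int) : Int :=
  let MOD : Int := 10 ^ 9 + 7
  let n := arr.length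
  let pow2 : List Int := ((List.range n).foldl
    (fun (s : List Int × Int) _ => (s.1 ++ [s.2], PySem.Int.mod (s.2 * 2) MOD)) ([], 1)).1
  let half : Int := if n ≠ 0 then PySem.List.pyGetD pow2 ((n : Int) - 1) 0 else 0
  let total : Int := (PySem.List.enumerate arr 0).foldl
    (fun t p => t + PySem.Int.mod p.2 MOD *
      PySem.Int.mod (3 * half - PySem.List.pyGetD pow2 p.1 0
        - PySem.List.pyGetD pow2 ((n : Int) - 1 - p.1) 0) MOD) 0
  PySem.Int.mod total MOD

-- ===== PRECONDITION & SPEC =====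
def Spec_summingPieces (arr : List Int) (out : Int) : Prop := out = summingPieces_alt arr
instance (arr : List Int) (out : Int) : Decidable (Spec_summingPieces arr out) := by unfold Spec_summingPieces; infer_instance

-- ===== CLAIM (what is proved, stated in full; the proofs are below) =====
def Claim_equal_summingPieces : Prop := ∀ (arr : List Int), Dom_summingPieces arr → Spec_summingPieces arr (summingPieces arr)

-- ===== LEMMAS AND PROOFS =====

-- the working field and the closed-form pieces
def pvP : ℕ := 1000000007

def stepK (s : ZMod pvP × ZMod pvP × ZMod pvP × ZMod pvP) (x : ZMod pvP) :
    ZMod pvP × ZMod pvP × ZMod pvP × ZMod pvP :=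
  let coeff := s.2.2.2 + s.2.1
  let total := s.2.2.1 * 2 + (coeff * x + s.1)
  (s.1 + s.2.1 * x, s.2.1 * 2, total, coeff)

def wK (m i : ℕ) : ZMod pvP := 3 * 2 ^ (m - 1) - 2 ^ i - 2 ^ (m - 1 - i)

def psK (ys : List (ZMod pvP)) : ZMod pvP :=
  ∑ i ∈ Finset.range ys.length, 2 ^ i * ys.getD i 0

def tK (ys : List (ZMod pvP)) : ZMod pvP :=
  ∑ i ∈ Finset.range ys.length, ys.getD i 0 * wK ys.length i

def castState (s : Int × Int × Int × Int) :
    ZMod pvP × ZMod pvP × ZMod pvP × ZMod pvP :=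
  ((s.1 : ZMod pvP), (s.2.1 : ZMod pvP), (s.2.2.1 : ZMod pvP), (s.2.2.2 : ZMod pvP))

lemma castEmod (a : Int) : ((a % 1000000007 : Int) : ZMod pvP) = (a : ZMod pvP) := by
  have h : (1000000007 : ℤ) = ((pvP : ℕ) : ℤ) := by norm_num [pvP]
  rw [h, ZMod.intCast_mod]

lemma castMod (a : Int) : ((PySem.Int.mod a (10 ^ 9 + 7) : Int) : ZMod pvP) = (a : ZMod pvP) := by
  rw [PySem.Int.mod_eq_emod_of_pos (by norm_num)]
  norm_num [castEmod]

lemma cast_stepA (s : Int × Int × Int × Int) (x : Int) :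
    castState (stepA s x) = stepK (castState s) (x : ZMod pvP) := by
  simp only [stepA, stepK, castState]
  refine Prod.ext ?_ (Prod.ext ?_ (Prod.ext ?_ ?_)) <;> simp [castEmod]

lemma cast_foldA (xs : List Int) (s : Int × Int × Int × Int) :
    castState (xs.foldl stepA s) = (xs.map (Int.cast)).foldl stepK (castState s) := by
  induction xs generalizing s with
  | nil => rfl
  | cons x xs ih => simp [List.foldl_cons, ih, cast_stepA]

lemma psK_append (ys : List (ZMod pvP)) (x : ZMod pvP) :
    psK (ys ++ [x]) = psK ys + 2 ^ ys.length * x := by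
  simp only [psK, List.length_append, List.length_cons, List.length_nil,
    Finset.sum_range_succ]
  congr 1
  · exact Finset.sum_congr rfl fun i hi => by
      rw [List.getD_append _ _ _ _ (Finset.mem_range.1 hi)]
  · simp

lemma wK_succ_self (m : ℕ) : wK (m + 1) m = 2 ^ m - 1 + 2 ^ m := by
  simp only [wK, Nat.add_sub_cancel, Nat.sub_self, pow_zero]
  ring

lemma wK_succ_lt (m i : ℕ) (h : i < m) : wK (m + 1) i = 2 * wK m i + 2 ^ i := by
  simp only [wK, Nat.add_sub_cancel]
  have h2 : (2 : ZMod pvP) ^ (m - i) = 2 ^ (m - 1 - i) * 2 := by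
    rw [← pow_succ]; congr 1; omega
  have h3 : (2 : ZMod pvP) ^ m = 2 ^ (m - 1) * 2 := by
    rw [← pow_succ]; congr 1; omega
  rw [h2, h3]; ring

lemma tK_append (ys : List (ZMod pvP)) (x : ZMod pvP) :
    tK (ys ++ [x]) = tK ys * 2 + ((wK (ys.length + 1) ys.length) * x + psK ys) := by
  simp only [tK, psK, List.length_append, List.length_cons, List.length_nil,
    zero_add, Finset.sum_range_succ]
  have hx : (ys ++ [x]).getD ys.length 0 = x := by simp
  rw [hx]
  have hmain : ∑ i ∈ Finset.range ys.length, (ys ++ [x]).getD i 0 * wK (ys.length + 1) i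
      = (∑ i ∈ Finset.range ys.length, ys.getD i 0 * wK ys.length i) * 2
        + ∑ i ∈ Finset.range ys.length, 2 ^ i * ys.getD i 0 := by
    rw [Finset.sum_mul, ← Finset.sum_add_distrib]
    refine Finset.sum_congr rfl fun i hi => ?_
    have hi' := Finset.mem_range.1 hi
    rw [List.getD_append _ _ _ _ hi', wK_succ_lt _ _ hi']
    ring
  rw [hmain]
  ring

lemma foldK (ys : List (ZMod pvP)) :
    ys.foldl stepK (0, 1, 0, 0) = (psK ys, 2 ^ ys.length, tK ys, 2 ^ ys.length - 1) := by
  induction ys using List.reverseRecOn with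
  | nil => simp [psK, tK]
  | append_singleton ys x ih =>
    rw [List.foldl_append, ih]
    refine Prod.ext ?_ (Prod.ext ?_ (Prod.ext ?_ ?_))
    · simp only [List.foldl_cons, List.foldl_nil, stepK, psK_append]
    · simp [stepK, pow_succ]
    · simp only [List.foldl_cons, List.foldl_nil, stepK, tK_append, wK_succ_self]
    · simp [stepK, pow_succ]; ring

lemma castState_init : castState (0, 1, 0, 0) = (0, 1, 0, 0) := by
  simp [castState]

lemma A_cast (arr : List Int) :
    ((summingPieces arr : Int) : ZMod pvP) = tK (arr.map (Int.cast)) := by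
  unfold summingPieces
  rw [PySem.List.foldl_pyRange_zero_pyGetD' arr 0 stepA (0, 1, 0, 0)]
  have h := cast_foldA arr (0, 1, 0, 0)
  have h3 : ((arr.foldl stepA (0, 1, 0, 0)).2.2.1 : ZMod pvP)
      = (castState (arr.foldl stepA (0, 1, 0, 0))).2.2.1 := rfl
  rw [h3, h, castState_init, foldK]

lemma castMod' (a : Int) : ((PySem.Int.mod a 1000000007 : Int) : ZMod pvP) = (a : ZMod pvP) := by
  rw [PySem.Int.mod_eq_emod_of_pos (by norm_num), castEmod]

lemma pow2_fold (n : ℕ) :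
    (List.range n).foldl
        (fun (s : List Int × Int) _ => (s.1 ++ [s.2], PySem.Int.mod (s.2 * 2) 1000000007)) ([], 1)
      = ((List.range n).map (fun i => (2 : ℤ) ^ i % 1000000007), (2 : ℤ) ^ n % 1000000007) := by
  induction n with
  | zero => norm_num
  | succ n ih =>
    rw [List.range_succ, List.foldl_append, ih, List.foldl_cons, List.foldl_nil]
    refine Prod.ext ?_ ?_
    · simp
    · show PySem.Int.mod ((2 : ℤ) ^ n % 1000000007 * 2) 1000000007 = 2 ^ (n + 1) % 1000000007
      rw [PySem.Int.mod_eq_emod_of_pos (by norm_num), pow_succ, Int.mul_emod (2 ^ n) 2]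
      norm_num [Int.mul_emod ((2:ℤ) ^ n % 1000000007) 2]

lemma cast_getD_map (arr : List Int) (k : ℕ) (hk : k < arr.length) :
    ((arr.map (fun a : Int => (a : ZMod pvP))).getD k 0) = ((arr.getD k 0 : Int) : ZMod pvP) := by
  rw [List.getD_eq_getElem _ _ (by simpa using hk), List.getElem_map,
    List.getD_eq_getElem _ _ hk]

lemma B_cast (arr : List Int) :
    ((summingPieces_alt arr : Int) : ZMod pvP) = tK (arr.map (Int.cast)) := by
  simp only [summingPieces_alt]
  rw [PySem.List.foldl_add]
  rw [PySem.List.enumerate_eq_map_pyRange arr 0]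
  rw [PySem.List.len_eq, PySem.List.pyRange_zero_nat, List.map_map, List.map_map]
  rw [castMod]
  have hsum : ∀ (F : ℕ → ℤ),
      ((List.range arr.length).map (fun k => F k)).sum = ∑ k ∈ Finset.range arr.length, F k :=
    fun F => rfl
  rw [zero_add, hsum]
  push_cast
  unfold tK
  rw [List.length_map]
  refine Finset.sum_congr rfl fun k hk => ?_
  have hk' := Finset.mem_range.1 hk
  simp only [Function.comp]
  have hnn : arr.length ≠ 0 := by omega
  rw [if_pos hnn]
  have e2 : ((arr.length : ℤ) - 1 - (k : ℤ)) = ((arr.length - 1 - k : ℕ) : ℤ) := by omega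
  have e1 : ((arr.length : ℤ) - 1) = ((arr.length - 1 : ℕ) : ℤ) := by omega
  rw [e2, e1]
  rw [PySem.List.pyGetD_natCast, PySem.List.pyGetD_natCast, PySem.List.pyGetD_natCast,
    PySem.List.pyGetD_natCast]
  rw [pow2_fold]
  simp only
  rw [PySem.List.getD_map_range _ _ _ _ (by omega), PySem.List.getD_map_range _ _ _ _ (by omega),
    PySem.List.getD_map_range _ _ _ _ (by omega)]
  rw [Int.cast_mul, castMod', castMod']
  push_cast [castEmod]
  rw [cast_getD_map arr k hk', wK]

lemma boundsA_fold (xs : List Int) (s : Int × Int × Int × Int)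
    (h0 : 0 ≤ s.2.2.1) (h1 : s.2.2.1 < 10 ^ 9 + 7) :
    0 ≤ (xs.foldl stepA s).2.2.1 ∧ (xs.foldl stepA s).2.2.1 < 10 ^ 9 + 7 := by
  induction xs generalizing s with
  | nil => exact ⟨h0, h1⟩
  | cons x xs ih =>
    exact ih _ (PySem.Int.mod_nonneg _ (by norm_num)) (PySem.Int.mod_lt _ (by norm_num))

lemma A_bounds (arr : List Int) :
    0 ≤ summingPieces arr ∧ summingPieces arr < 10 ^ 9 + 7 := by
  unfold summingPieces
  rw [PySem.List.foldl_pyRange_zero_pyGetD' arr 0 stepA (0, 1, 0, 0)]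
  exact boundsA_fold arr _ (by norm_num) (by norm_num)

lemma B_bounds (arr : List Int) :
    0 ≤ summingPieces_alt arr ∧ summingPieces_alt arr < 10 ^ 9 + 7 := by
  simp only [summingPieces_alt]
  exact ⟨PySem.Int.mod_nonneg _ (by norm_num), PySem.Int.mod_lt _ (by norm_num)⟩

lemma int_eq_of_cast {a b : Int} (ha0 : 0 ≤ a) (ha : a < 10 ^ 9 + 7)
    (hb0 : 0 ≤ b) (hb : b < 10 ^ 9 + 7)
    (h : (a : ZMod pvP) = (b : ZMod pvP)) : a = b := by
  rw [ZMod.intCast_eq_intCast_iff'] at h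
  have hp : ((pvP : ℕ) : ℤ) = 10 ^ 9 + 7 := by norm_num [pvP]
  rw [hp, Int.emod_eq_of_lt ha0 (by norm_num at ha ⊢; omega),
    Int.emod_eq_of_lt hb0 (by norm_num at hb ⊢; omega)] at h
  exact h

-- ===== VERDICT (by name: the statement is the Claim_ definition above) =====
theorem summingPieces_spec : Claim_equal_summingPieces := by
  intro arr _
  unfold Spec_summingPieces
  exact int_eq_of_cast (A_bounds arr).1 (A_bounds arr).2 (B_bounds arr).1 (B_bounds arr).2
    ((A_cast arr).trans (B_cast arr).symm)
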